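-- pv_equiv track=rewrite | github.com/arontier/igpose | src/common/collate_embed.py | truncate_sequences
-- ===== SOURCE A (Python) =====
-- def truncate_sequences(sequence):
--     # Find the first valid amino acid token
--     first_valid = next((i for i, token in enumerate(sequence) if token != '<mask>'), None)
--     # Find the last valid amino acid token by iterating in reverse
--     last_valid = next((i for i, token in enumerate(reversed(sequence)) if token != '<mask>'), None)
--     if first_valid is not None and last_valid is not None:
--         # Convert last_valid from reverse index to actual index
--         last_valid = len(sequence) - last_valid - 1
--         # Slice the list from the first valid token to the last valid token (inclusive)
--         filtered_sequence = sequence[first_valid:last_valid + 1]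
--     else:
--         # No valid amino acid found, return an empty list or handle as needed
--         filtered_sequence = []
--     return filtered_sequence, last_valid
-- ===== SOURCE B (Python) =====
-- def truncate_sequences(sequence):
--     valid = [i for i, token in enumerate(sequence) if token != '<mask>']
--     if valid:
--         first, last = valid[0], valid[-1]
--         return sequence[first:last + 1], last
--     return [], None
-- ===== Notes on version B (the rewrite author's own statement) =====
-- stated objective: simpler
-- what changed: One forward pass collects all non-mask indices and reads its endpoints, replacing A's two short-circuiting scans (forward and over reversed(sequence)) and the reverse-index arithmetic.
import Mathlib
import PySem

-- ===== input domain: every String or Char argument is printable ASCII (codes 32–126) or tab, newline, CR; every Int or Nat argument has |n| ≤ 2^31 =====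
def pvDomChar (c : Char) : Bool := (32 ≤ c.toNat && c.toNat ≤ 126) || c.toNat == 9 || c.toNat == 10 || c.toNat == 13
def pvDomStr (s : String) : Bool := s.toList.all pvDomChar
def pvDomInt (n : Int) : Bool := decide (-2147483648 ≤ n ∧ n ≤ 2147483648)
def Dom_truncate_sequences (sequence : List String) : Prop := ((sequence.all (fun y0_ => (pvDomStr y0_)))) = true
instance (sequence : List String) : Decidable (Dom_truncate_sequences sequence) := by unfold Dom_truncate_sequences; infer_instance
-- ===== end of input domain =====

-- B collects all non-mask indices in one forward pass and reads the endpoints of that list,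
-- replacing A's two short-circuiting scans (forward and reversed) and the reverse-index arithmetic; same return values.

-- ===== PORT A =====
-- next((i for i, token in enumerate(l) if token != '<mask>'), None), with the index counter starting at i
def pvFindFirst (l : List String) (i : Int) : Option Int :=
  match l with
  | [] => none
  | t :: rest => if t ≠ "<mask>" then some i else pvFindFirst rest (i + 1)

def truncate_sequences (sequence : List String) : List String × Option Int :=
  let first_valid := pvFindFirst sequence 0
  let last_valid := pvFindFirst sequence.reverse 0
  match first_valid, last_valid with
  | some f, some lr =>
      let lv : Int := (sequence.length : Int) - lr - 1
      (PySem.List.slice sequence (some f) (some (lv + 1)), some lv)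
  | _, _ => ([], last_valid)

-- ===== PORT B =====
-- [i for i, token in enumerate(l) if token != '<mask>'], with the index counter starting at i
def pvValidIdx (l : List String) (i : Int) : List Int :=
  match l with
  | [] => []
  | t :: rest => if t ≠ "<mask>" then i :: pvValidIdx rest (i + 1) else pvValidIdx rest (i + 1)

def truncate_sequences_alt (sequence : List String) : List String × Option Int :=
  match pvValidIdx sequence 0 with
  | [] => ([], none)
  | first :: rest =>
      let last := (first :: rest).getLast (List.cons_ne_nil first rest)
      (PySem.List.slice sequence (some first) (some (last + 1)), some last)

-- ===== PRECONDITION & SPEC =====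
def Spec_truncate_sequences (sequence : List String) (out : List String × Option Int) : Prop := out = truncate_sequences_alt sequence
instance (sequence : List String) (out : List String × Option Int) : Decidable (Spec_truncate_sequences sequence out) := by unfold Spec_truncate_sequences; infer_instance

-- ===== CLAIM (what is proved, stated in full; the proofs are below) =====
def Claim_equal_truncate_sequences : Prop := ∀ (sequence : List String), Dom_truncate_sequences sequence → Spec_truncate_sequences sequence (truncate_sequences sequence)

-- ===== LEMMAS AND PROOFS =====

theorem pvValidIdx_shift (l : List String) (i : Int) :
    pvValidIdx l i = (pvValidIdx l 0).map (· + i) := by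
  induction l generalizing i with
  | nil => simp [pvValidIdx]
  | cons t rest ih =>
    simp only [pvValidIdx]
    by_cases h : t = "<mask>" <;>
      (simp [h, ih (i + 1), ih 1, List.map_map]; intro a _; ring)

theorem pvValidIdx_append (l : List String) (a : String) (i : Int) :
    pvValidIdx (l ++ [a]) i
      = pvValidIdx l i ++ (if a ≠ "<mask>" then [i + (l.length : Int)] else []) := by
  induction l generalizing i with
  | nil => by_cases h : a = "<mask>" <;> simp [pvValidIdx, h]
  | cons t rest ih =>
    simp only [List.cons_append, pvValidIdx]
    by_cases h : t = "<mask>" <;> simp [h, ih (i + 1)] <;> ring_nf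

theorem pvValidIdx_reverse (l : List String) :
    (pvValidIdx l.reverse 0).map (fun j => (l.length : Int) - 1 - j)
      = (pvValidIdx l 0).reverse := by
  induction l with
  | nil => rfl
  | cons t rest ih =>
    rw [List.reverse_cons, pvValidIdx_append]
    have key : (pvValidIdx rest.reverse 0).map (fun j => ((t :: rest).length : Int) - 1 - j)
        = (pvValidIdx rest 1).reverse := by
      rw [pvValidIdx_shift rest 1, ← List.map_reverse, ← ih, List.map_map]
      congr 1
      funext j
      simp
      ring
    rw [List.map_append, key]
    by_cases h : t = "<mask>" <;> simp [pvValidIdx, h]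

theorem pvFindFirst_eq_head (l : List String) (i : Int) :
    pvFindFirst l i = (pvValidIdx l i).head? := by
  induction l generalizing i with
  | nil => rfl
  | cons t rest ih =>
    simp only [pvFindFirst, pvValidIdx]
    by_cases h : t = "<mask>" <;> simp [h, ih]

theorem truncate_eq_alt (sequence : List String) :
    truncate_sequences sequence = truncate_sequences_alt sequence := by
  match hv : pvValidIdx sequence 0 with
  | [] =>
    have h1 : pvFindFirst sequence 0 = none := by rw [pvFindFirst_eq_head, hv]; rfl
    have hrev : pvValidIdx sequence.reverse 0 = [] := by
      have := pvValidIdx_reverse sequence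
      rw [hv] at this
      simpa using this
    have h2 : pvFindFirst sequence.reverse 0 = none := by
      rw [pvFindFirst_eq_head, hrev]; rfl
    simp [truncate_sequences, truncate_sequences_alt, h1, h2, hv]
  | first :: rest =>
    have h1 : pvFindFirst sequence 0 = some first := by rw [pvFindFirst_eq_head, hv]; rfl
    have hrevmap := pvValidIdx_reverse sequence
    rw [hv] at hrevmap
    have hne : pvValidIdx sequence.reverse 0 ≠ [] := by
      intro h; rw [h] at hrevmap; simp at hrevmap
    obtain ⟨lr, tl, hlr⟩ := List.exists_cons_of_ne_nil hne
    have h2 : pvFindFirst sequence.reverse 0 = some lr := by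
      rw [pvFindFirst_eq_head, hlr]; rfl
    have hhead : ((pvValidIdx sequence.reverse 0).map
        (fun j => (sequence.length : Int) - 1 - j)).head? = some ((sequence.length : Int) - 1 - lr) := by
      rw [hlr]; rfl
    have hlast : (sequence.length : Int) - 1 - lr
        = (first :: rest).getLast (List.cons_ne_nil first rest) := by
      have h3 := hrevmap ▸ hhead
      rw [List.head?_reverse, List.getLast?_eq_some_getLast (l := first :: rest) (by simp)] at h3
      exact (Option.some_injective _ h3.symm)
    have harith : (sequence.length : Int) - lr - 1 = (sequence.length : Int) - 1 - lr := by ring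
    simp only [truncate_sequences, truncate_sequences_alt, h1, h2, hv, harith, hlast]

-- ===== VERDICT (by name: the statement is the Claim_ definition above) =====
theorem truncate_sequences_spec : Claim_equal_truncate_sequences := by
  intro sequence _
  unfold Spec_truncate_sequences
  exact truncate_eq_alt sequence
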